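-- pv_equiv track=rewrite | github.com/csu-signal/Roleplay-for-Collaborative-Dialogues | friction_roleplay_collaboration.py | map_to_framework
-- ===== SOURCE A (Python) =====
-- def map_to_framework(cards):
--     """
--     Map specific cards to the OV framework (Vowel, Consonant, Even, Odd).
--
--     Args:
--         cards (list): List of card identifiers.
--
--     Returns:
--         str: The mapped solution in CEOV notation.
--     """
--     vowels = set("AEIOU")
--     result = ""
--
--     # Check for consonant (C)
--     if any(card.isalpha() and card.upper() not in vowels for card in cards):
--         result += "C"
--
--     # Check for even number (E)
--     if any(card.isdigit() and int(card) % 2 == 0 for card in cards):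
--         result += "E"
--
--     # Check for odd number (O)
--     if any(card.isdigit() and int(card) % 2 == 1 for card in cards):
--         result += "O"
--
--     # Check for vowel (V)
--     if any(card.isalpha() and card.upper() in vowels for card in cards):
--         result += "V"
--
--     return result if result else "none"
-- ===== SOURCE B (Python) =====
-- def map_to_framework(cards):
--     """Single pass: accumulate four flags, then emit CEOV in fixed order."""
--     vowels = set("AEIOU")
--     cons = even = odd = vow = False
--     for card in cards:
--         cons = cons or (card.isalpha() and card.upper() not in vowels)
--         even = even or (card.isdigit() and int(card) % 2 == 0)
--         odd = odd or (card.isdigit() and int(card) % 2 == 1)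
--         vow = vow or (card.isalpha() and card.upper() in vowels)
--     result = ("C" if cons else "") + ("E" if even else "") + ("O" if odd else "") + ("V" if vow else "")
--     return result if result else "none"
-- ===== Notes on version B (the rewrite author's own statement) =====
-- stated objective: simpler
-- what changed: Replaces A's four separate any-scans over the card list by a single pass that accumulates four boolean flags and then emits C/E/O/V in fixed order.
import Mathlib
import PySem

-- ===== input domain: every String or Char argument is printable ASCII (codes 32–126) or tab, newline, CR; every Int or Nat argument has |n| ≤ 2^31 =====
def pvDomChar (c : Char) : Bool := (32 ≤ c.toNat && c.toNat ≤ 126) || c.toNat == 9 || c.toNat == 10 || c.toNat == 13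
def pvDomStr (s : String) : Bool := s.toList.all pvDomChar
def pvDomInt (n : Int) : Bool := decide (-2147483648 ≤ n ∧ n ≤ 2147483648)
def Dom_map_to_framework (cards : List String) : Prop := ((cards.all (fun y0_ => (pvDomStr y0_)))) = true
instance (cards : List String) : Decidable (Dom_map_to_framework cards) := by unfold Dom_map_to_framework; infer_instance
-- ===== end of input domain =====

-- B replaces A's four any-scans over the cards by one fold accumulating four flags (simpler, one pass).


-- ===== PORT A =====
-- vowels = set("AEIOU")
def pvVowels : List String := PySem.Set.ofList ["A", "E", "I", "O", "U"]

-- card.isalpha() and card.upper() not in vowels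
def pvIsConsCard (card : String) : Bool :=
  PySem.Str.strIsalpha card && !(pvVowels.contains (PySem.Str.upper card))

-- card.isdigit() and int(card) % 2 == 0   (int(card) cannot fail when isdigit holds)
def pvIsEvenCard (card : String) : Bool :=
  PySem.Str.strIsdigit card &&
    (match PySem.Int.ofStr? card with
     | some n => PySem.Int.mod n 2 == 0
     | none => false)

-- card.isdigit() and int(card) % 2 == 1
def pvIsOddCard (card : String) : Bool :=
  PySem.Str.strIsdigit card &&
    (match PySem.Int.ofStr? card with
     | some n => PySem.Int.mod n 2 == 1
     | none => false)

-- card.isalpha() and card.upper() in vowels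
def pvIsVowCard (card : String) : Bool :=
  PySem.Str.strIsalpha card && pvVowels.contains (PySem.Str.upper card)

def map_to_framework (cards : List String) : String :=
  let result := ""
  let result := if cards.any pvIsConsCard then result ++ "C" else result
  let result := if cards.any pvIsEvenCard then result ++ "E" else result
  let result := if cards.any pvIsOddCard then result ++ "O" else result
  let result := if cards.any pvIsVowCard then result ++ "V" else result
  if result == "" then "none" else result

-- ===== PORT B =====
-- one fold over cards accumulating (cons, even, odd, vow) flags
def pvFlagStep (st : Bool × Bool × Bool × Bool) (card : String) : Bool × Bool × Bool × Bool :=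
  (st.1 || pvIsConsCard card,
   st.2.1 || pvIsEvenCard card,
   st.2.2.1 || pvIsOddCard card,
   st.2.2.2 || pvIsVowCard card)

def map_to_framework_alt (cards : List String) : String :=
  let flags := cards.foldl pvFlagStep (false, false, false, false)
  let result := (if flags.1 then "C" else "") ++ (if flags.2.1 then "E" else "")
             ++ (if flags.2.2.1 then "O" else "") ++ (if flags.2.2.2 then "V" else "")
  if result == "" then "none" else result

-- ===== PRECONDITION & SPEC =====
def Spec_map_to_framework (cards : List String) (out : String) : Prop := out = map_to_framework_alt cards
instance (cards : List String) (out : String) : Decidable (Spec_map_to_framework cards out) := by unfold Spec_map_to_framework; infer_instance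

-- ===== CLAIM (what is proved, stated in full; the proofs are below) =====
def Claim_equal_map_to_framework : Prop := ∀ (cards : List String), Dom_map_to_framework cards → Spec_map_to_framework cards (map_to_framework cards)

-- ===== LEMMAS AND PROOFS =====
theorem pvFoldl_flags (cards : List String) (a b c d : Bool) :
    cards.foldl pvFlagStep (a, b, c, d) =
      (a || cards.any pvIsConsCard, b || cards.any pvIsEvenCard,
       c || cards.any pvIsOddCard, d || cards.any pvIsVowCard) := by
  induction cards generalizing a b c d with
  | nil => simp
  | cons hd tl ih =>
      simp only [List.foldl_cons, pvFlagStep, List.any_cons]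
      rw [ih]
      simp [Bool.or_assoc]

-- ===== VERDICT (by name: the statement is the Claim_ definition above) =====
theorem map_to_framework_spec : Claim_equal_map_to_framework := by
  intro cards _
  unfold Spec_map_to_framework map_to_framework map_to_framework_alt
  rw [pvFoldl_flags]
  simp only [Bool.false_or]
  cases cards.any pvIsConsCard <;> cases cards.any pvIsEvenCard <;>
    cases cards.any pvIsOddCard <;> cases cards.any pvIsVowCard <;> rfl
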